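-- pv_equiv track=rewrite | github.com/kshitij0313/mosaic-war-room | insights.py | build_weekly_brief
-- ===== SOURCE A (Python) =====
-- from typing import Any, Dict, List
--
-- def build_weekly_brief(creative: List[str], longevity: List[str], strategy: List[str], gaps: List[str]) -> str:
--     lines = ["Competitor Ad War Room — Weekly Brief", ""]
--     lines.append("3 Creative Trends")
--     for i, line in enumerate(creative[:3], start=1):
--         lines.append(f"{i}. {line}")
--     lines.append("")
--     lines.append("2 Winning Formats")
--     for i, line in enumerate(longevity[:2], start=1):
--         lines.append(f"{i}. {line}")
--     lines.append("")
--     lines.append("2 Strategic Insights")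
--     for i, line in enumerate(strategy[:2], start=1):
--         lines.append(f"{i}. {line}")
--     lines.append("")
--     lines.append("2 Opportunity Gaps")
--     for i, line in enumerate(gaps[:2], start=1):
--         lines.append(f"{i}. {line}")
--     return "\n".join(lines)
-- ===== SOURCE B (Python) =====
-- def build_weekly_brief(creative, longevity, strategy, gaps):
--     # Build the brief back-to-front by continuation-passing recursion,
--     # concatenating directly into one string: no list of lines, no join.
--     def nums(items, i, cap, rest):
--         if not items or i > cap:
--             return rest
--         return "\n" + str(i) + ". " + items[0] + nums(items[1:], i + 1, cap, rest)
--
--     def section(header, items, cap, rest):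
--         return "\n\n" + header + nums(items, 1, cap, rest)
--
--     return ("Competitor Ad War Room — Weekly Brief"
--             + section("3 Creative Trends", creative, 3,
--               section("2 Winning Formats", longevity, 2,
--               section("2 Strategic Insights", strategy, 2,
--               section("2 Opportunity Gaps", gaps, 2, "")))))
-- ===== Notes on version B (the rewrite author's own statement) =====
-- stated objective: alternative
-- what changed: B discards A's flat line-list-plus-join design: it builds the string back-to-front by continuation-passing recursion, each section and each numbered item prepending itself (with its '\n'/'\n\n' separator) directly onto the already-built tail string; no list of lines and no join exist in B.
import Mathlib
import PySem

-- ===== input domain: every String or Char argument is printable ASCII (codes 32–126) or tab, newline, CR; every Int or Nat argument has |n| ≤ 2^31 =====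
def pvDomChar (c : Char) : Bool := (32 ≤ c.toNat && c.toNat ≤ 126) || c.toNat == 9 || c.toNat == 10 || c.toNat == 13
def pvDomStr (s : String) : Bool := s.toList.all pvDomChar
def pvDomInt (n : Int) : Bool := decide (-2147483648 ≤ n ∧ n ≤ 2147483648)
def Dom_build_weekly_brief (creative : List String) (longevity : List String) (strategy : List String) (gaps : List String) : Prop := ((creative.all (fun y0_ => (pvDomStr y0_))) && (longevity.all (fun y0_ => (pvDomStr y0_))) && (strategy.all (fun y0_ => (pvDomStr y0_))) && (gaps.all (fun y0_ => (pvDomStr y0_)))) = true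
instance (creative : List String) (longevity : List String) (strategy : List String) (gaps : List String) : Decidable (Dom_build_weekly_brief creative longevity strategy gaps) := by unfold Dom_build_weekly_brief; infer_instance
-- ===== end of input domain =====

-- B replaces A's flat line-list + "\n".join by back-to-front continuation-passing
-- recursion that concatenates each piece directly onto the already-built tail string
-- (alternative decomposition; same cost).

-- ===== PORT A =====
-- numbered lines of one section: [f"{i}. {line}" for i, line in enumerate(items[:n], start=1)]
def pvNumbered (items : List String) (n : Int) : List String :=
  (PySem.List.enumerate (PySem.List.slice items none (some n)) 1).map
    (fun p => PySem.Int.toStr p.1 ++ ". " ++ p.2)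

def build_weekly_brief (creative : List String) (longevity : List String) (strategy : List String) (gaps : List String) : String :=
  let lines : List String := ["Competitor Ad War Room — Weekly Brief", ""]
  let lines := lines ++ ["3 Creative Trends"]
  let lines := lines ++ pvNumbered creative 3
  let lines := lines ++ [""]
  let lines := lines ++ ["2 Winning Formats"]
  let lines := lines ++ pvNumbered longevity 2
  let lines := lines ++ [""]
  let lines := lines ++ ["2 Strategic Insights"]
  let lines := lines ++ pvNumbered strategy 2
  let lines := lines ++ [""]
  let lines := lines ++ ["2 Opportunity Gaps"]
  let lines := lines ++ pvNumbered gaps 2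
  PySem.Str.join "\n" lines

-- ===== PORT B =====
-- nums(items, i, cap, rest): prepend "\n{i}. {item}" for each item while i <= cap, onto rest
def pvNums (items : List String) (i : Int) (cap : Int) (rest : String) : String :=
  match items with
  | [] => rest
  | x :: xs =>
    if i > cap then rest
    else "\n" ++ PySem.Int.toStr i ++ ". " ++ x ++ pvNums xs (i + 1) cap rest

-- section(header, items, cap, rest) = "\n\n" + header + nums(items, 1, cap, rest)
def pvSection (header : String) (items : List String) (cap : Int) (rest : String) : String :=
  "\n\n" ++ header ++ pvNums items 1 cap rest

def build_weekly_brief_alt (creative : List String) (longevity : List String) (strategy : List String) (gaps : List String) : String :=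
  "Competitor Ad War Room — Weekly Brief"
    ++ pvSection "3 Creative Trends" creative 3
       (pvSection "2 Winning Formats" longevity 2
        (pvSection "2 Strategic Insights" strategy 2
         (pvSection "2 Opportunity Gaps" gaps 2 "")))

-- ===== PRECONDITION & SPEC =====
def Spec_build_weekly_brief (creative : List String) (longevity : List String) (strategy : List String) (gaps : List String) (out : String) : Prop := out = build_weekly_brief_alt creative longevity strategy gaps
instance (creative : List String) (longevity : List String) (strategy : List String) (gaps : List String) (out : String) : Decidable (Spec_build_weekly_brief creative longevity strategy gaps out) := by unfold Spec_build_weekly_brief; infer_instance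

-- ===== CLAIM =====
def Claim_equal_build_weekly_brief : Prop := ∀ (creative : List String) (longevity : List String) (strategy : List String) (gaps : List String), Dom_build_weekly_brief creative longevity strategy gaps → Spec_build_weekly_brief creative longevity strategy gaps (build_weekly_brief creative longevity strategy gaps)

-- ===== LEMMAS AND PROOFS =====
-- join with "\n" = head ++ flat list of '\n'-prefixed tails
lemma join_newline (x : List Char) (xs : List (List Char)) :
    PySem.Chars.join ['\n'] (x :: xs) = x ++ xs.flatMap (fun y => '\n' :: y) := by
  induction xs generalizing x with
  | nil => simp [PySem.Chars.join_singleton]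
  | cons y ys ih =>
    rw [PySem.Chars.join_cons_cons, ih y]
    simp

-- B's nums, as characters: the '\n'-prefixed numbered lines of the first (cap - i + 1) items
lemma nums_toList (cap : Int) :
    ∀ (items : List String) (i : Int) (rest : String),
    (pvNums items i cap rest).toList =
      ((PySem.List.enumerate (items.take (cap - i + 1).toNat) i).map
        (fun p => '\n' :: (PySem.Int.toStr p.1 ++ ". " ++ p.2).toList)).flatten
        ++ rest.toList := by
  intro items
  induction items with
  | nil => intro i rest; simp [pvNums]
  | cons x xs ih =>
    intro i rest
    by_cases h : i > cap
    · have h0 : (cap - i + 1).toNat = 0 := by omega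
      simp [pvNums, h, h0]
    · have h1 : (cap - i + 1).toNat = (cap - (i + 1) + 1).toNat + 1 := by omega
      rw [pvNums, if_neg h, h1]
      simp only [List.take_succ_cons, PySem.List.enumerate_cons, List.map_cons,
        List.flatten_cons]
      simp only [String.toList_append, ih (i + 1) rest]
      simp

lemma section_toList (header : String) (items : List String) (cap : Int) (rest : String) :
    (pvSection header items cap rest).toList =
      '\n' :: '\n' :: header.toList ++ (pvNums items 1 cap rest).toList := by
  simp [pvSection]

lemma main_eq (creative longevity strategy gaps : List String) :
    build_weekly_brief creative longevity strategy gaps =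
      build_weekly_brief_alt creative longevity strategy gaps := by
  unfold build_weekly_brief build_weekly_brief_alt pvNumbered
  simp only [PySem.Str.join]
  have h3 : PySem.List.slice creative none (some 3) = creative.take 3 := by
    simpa using PySem.List.slice_to_natCast creative 3
  have hl : PySem.List.slice longevity none (some 2) = longevity.take 2 := by
    simpa using PySem.List.slice_to_natCast longevity 2
  have hs : PySem.List.slice strategy none (some 2) = strategy.take 2 := by
    simpa using PySem.List.slice_to_natCast strategy 2
  have hg : PySem.List.slice gaps none (some 2) = gaps.take 2 := by
    simpa using PySem.List.slice_to_natCast gaps 2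
  have e3 : ((3 : Int) - 1 + 1).toNat = 3 := by decide
  have e2 : ((2 : Int) - 1 + 1).toNat = 2 := by decide
  apply String.toList_inj.mp
  rw [String.toList_ofList]
  rw [List.map_append, List.map_append, List.map_append, List.map_append,
    List.map_append, List.map_append, List.map_append, List.map_append,
    List.map_append, List.map_append, List.map_append]
  simp only [List.map_cons, List.map_nil, List.cons_append, List.nil_append,
    List.append_assoc]
  have hn : "\n".toList = ['\n'] := rfl
  rw [hn, join_newline]
  rw [String.toList_append]
  apply congrArg (fun t => "Competitor Ad War Room — Weekly Brief".toList ++ t)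
  rw [section_toList, nums_toList, section_toList, nums_toList,
    section_toList, nums_toList, section_toList, nums_toList,
    h3, hl, hs, hg, e3, e2]
  simp [List.flatMap, List.map_map, Function.comp_def, PySem.Int.toList_toStr,
    List.append_assoc]

-- ===== VERDICT =====
theorem build_weekly_brief_spec : Claim_equal_build_weekly_brief := by
  intro c l s g _
  exact main_eq c l s g
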